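-- pv_equiv track=rewrite | github.com/wyim-pgl/redgene | element_db/fetch_amplicons.py | find_primer_in_seq
-- ===== SOURCE A (Python) =====
-- from typing import Dict, List, Optional, Tuple
--
-- def resolve_degenerate(seq: str) -> str:
--     """Replace degenerate IUPAC bases with first matching base for BLAST."""
--     iupac = {
--         "R": "A", "Y": "C", "S": "G", "W": "A", "K": "G", "M": "A",
--         "B": "C", "D": "A", "H": "A", "V": "A",
--     }
--     return "".join(iupac.get(c, c) for c in seq)
--
-- def find_primer_in_seq(primer: str, target: str) -> Optional[int]:
--     """Find primer position in target allowing degenerate bases."""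
--     primer_resolved = resolve_degenerate(primer)
--     # Try forward
--     pos = target.find(primer_resolved)
--     if pos >= 0:
--         return pos
--     # Try with mismatches (up to 2)
--     plen = len(primer_resolved)
--     for i in range(len(target) - plen + 1):
--         mismatches = sum(1 for a, b in zip(primer_resolved, target[i:i+plen]) if a != b)
--         if mismatches <= 2:
--             return i
--     return None
-- ===== SOURCE B (Python) =====
-- # One-pass scan: leftmost exact match wins, else leftmost window with <=2
-- # mismatches (inner comparison breaks at the 3rd mismatch).
-- _TRANS = str.maketrans("RYSWKMBDHV", "ACGAGACAAA")
--
-- def _mm_capped(p, window, cap):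
--     mm = 0
--     for a, b in zip(p, window):
--         if a != b:
--             mm += 1
--             if mm > cap:
--                 return mm
--     return mm
--
-- def find_primer_in_seq(primer, target):
--     p = primer.translate(_TRANS)
--     n, m = len(target), len(p)
--     first_approx = None
--     i = 0
--     while i + m <= n:
--         mm = _mm_capped(p, target[i:i+m], 2)
--         if mm == 0:
--             return i
--         if mm <= 2 and first_approx is None:
--             first_approx = i
--         i += 1
--     return first_approx
-- ===== Notes on version B (the rewrite author's own statement) =====
-- stated objective: faster
-- what changed: Replaces A's two passes (str.find, then a sliding window that fully counts mismatches at every offset) by one left-to-right scan that returns the leftmost exact hit immediately, remembers the leftmost <=2-mismatch window, and stops comparing each window at the 3rd mismatch.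
import Mathlib
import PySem

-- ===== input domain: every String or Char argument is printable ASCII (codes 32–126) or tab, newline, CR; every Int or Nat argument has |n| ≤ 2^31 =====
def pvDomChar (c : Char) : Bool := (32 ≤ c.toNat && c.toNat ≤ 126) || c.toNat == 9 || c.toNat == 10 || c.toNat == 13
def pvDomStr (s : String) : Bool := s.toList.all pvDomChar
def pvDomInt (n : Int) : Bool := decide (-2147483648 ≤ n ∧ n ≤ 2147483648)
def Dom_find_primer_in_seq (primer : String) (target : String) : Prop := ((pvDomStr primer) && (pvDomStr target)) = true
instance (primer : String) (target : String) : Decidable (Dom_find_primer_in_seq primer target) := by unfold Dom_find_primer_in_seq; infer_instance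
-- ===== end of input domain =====

-- B is a single left-to-right scan (leftmost exact hit returned at once, leftmost ≤2-mismatch
-- window remembered, inner comparison stops at the 3rd mismatch) instead of A's str.find pass
-- followed by a second full-count sliding-window pass; equal return value on every input.

-- ===== PORT A =====
def resolve_degenerate (seq : String) : String :=
  let iupac : PySem.Dict Char Char := PySem.Dict.ofList
    [('R','A'), ('Y','C'), ('S','G'), ('W','A'), ('K','G'), ('M','A'),
     ('B','C'), ('D','A'), ('H','A'), ('V','A')]
  -- "".join(iupac.get(c, c) for c in seq): per-character map rebuilt into a string
  String.ofList (seq.toList.map (fun c => iupac.getD c c))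

-- the 'for i in range(...)' loop with its early return
def find_primer_in_seq_loopA (p t : List Char) (plen : Int) : List Int → Option Int
  | [] => none
  | i :: rest =>
      let mismatches : Int :=
        ((p.zip (PySem.List.slice t (some i) (some (i + plen)))).countP
          (fun ab => ab.1 != ab.2) : Nat)
      if mismatches ≤ 2 then some i else find_primer_in_seq_loopA p t plen rest

def find_primer_in_seq (primer : String) (target : String) : Option Int :=
  let primer_resolved := resolve_degenerate primer
  let pos := PySem.Str.find target primer_resolved
  if pos ≥ 0 then some pos
  else
    let plen := PySem.Str.len primer_resolved
    find_primer_in_seq_loopA primer_resolved.toList target.toList plen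
      (PySem.List.pyRange 0 (PySem.Str.len target - plen + 1) 1)

-- ===== PORT B =====
-- str.maketrans("RYSWKMBDHV", "ACGAGACAAA") applied per character
def find_primer_in_seq_trans (c : Char) : Char :=
  if c = 'R' then 'A' else if c = 'Y' then 'C' else if c = 'S' then 'G'
  else if c = 'W' then 'A' else if c = 'K' then 'G' else if c = 'M' then 'A'
  else if c = 'B' then 'C' else if c = 'D' then 'A' else if c = 'H' then 'A'
  else if c = 'V' then 'A' else c

-- _mm_capped: mismatch count of zip(p, window), returning early past cap
def find_primer_in_seq_mmCapped (cap : Nat) : List Char → List Char → Nat → Nat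
  | [], _, mm => mm
  | _, [], mm => mm
  | a :: as, b :: bs, mm =>
      if a != b then
        if mm + 1 > cap then mm + 1
        else find_primer_in_seq_mmCapped cap as bs (mm + 1)
      else find_primer_in_seq_mmCapped cap as bs mm

-- the 'while i + m <= n' loop carrying first_approx
def find_primer_in_seq_loopB (p t : List Char) (i : Nat) (fa : Option Int) : Option Int :=
  if _h : i + p.length ≤ t.length then
    let mm := find_primer_in_seq_mmCapped 2 p ((t.drop i).take p.length) 0
    if mm = 0 then some (i : Int)
    else if mm ≤ 2 ∧ fa = none then find_primer_in_seq_loopB p t (i + 1) (some (i : Int))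
    else find_primer_in_seq_loopB p t (i + 1) fa
  else fa
termination_by t.length + 1 - i

def find_primer_in_seq_alt (primer : String) (target : String) : Option Int :=
  find_primer_in_seq_loopB (primer.toList.map find_primer_in_seq_trans) target.toList 0 none

-- ===== PRECONDITION & SPEC =====
def Spec_find_primer_in_seq (primer : String) (target : String) (out : Option Int) : Prop := out = find_primer_in_seq_alt primer target
instance (primer : String) (target : String) (out : Option Int) : Decidable (Spec_find_primer_in_seq primer target out) := by unfold Spec_find_primer_in_seq; infer_instance

-- ===== CLAIM (what is proved, stated in full; the proofs are below) =====
def Claim_equal_find_primer_in_seq : Prop := ∀ (primer : String) (target : String), Dom_find_primer_in_seq primer target → Spec_find_primer_in_seq primer target (find_primer_in_seq primer target)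

-- ===== LEMMAS AND PROOFS =====

-- the dict lookup of A and the translation of B agree character by character
set_option maxHeartbeats 1000000 in
theorem pv_char (c : Char) :
    (PySem.Dict.ofList
      [('R','A'), ('Y','C'), ('S','G'), ('W','A'), ('K','G'), ('M','A'),
       ('B','C'), ('D','A'), ('H','A'), ('V','A')] : PySem.Dict Char Char).getD c c
    = find_primer_in_seq_trans c := by
  have hd : (PySem.Dict.ofList
      [('R','A'), ('Y','C'), ('S','G'), ('W','A'), ('K','G'), ('M','A'),
       ('B','C'), ('D','A'), ('H','A'), ('V','A')] : PySem.Dict Char Char)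
      = PySem.Dict.mk [('R','A'), ('Y','C'), ('S','G'), ('W','A'), ('K','G'), ('M','A'),
       ('B','C'), ('D','A'), ('H','A'), ('V','A')] := by decide
  rw [hd]
  unfold find_primer_in_seq_trans
  simp only [PySem.Dict.getD, PySem.Dict.get?_mk_cons, beq_iff_eq]
  by_cases h1 : 'R' = c; · simp [h1.symm]
  by_cases h2 : 'Y' = c; · simp [h2.symm, h2 ▸ h1]
  by_cases h3 : 'S' = c; · simp [h3.symm]
  by_cases h4 : 'W' = c; · simp [h4.symm]
  by_cases h5 : 'K' = c; · simp [h5.symm]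
  by_cases h6 : 'M' = c; · simp [h6.symm]
  by_cases h7 : 'B' = c; · simp [h7.symm]
  by_cases h8 : 'D' = c; · simp [h8.symm]
  by_cases h9 : 'H' = c; · simp [h9.symm]
  by_cases h10 : 'V' = c; · simp [h10.symm]
  simp [h1, h2, h3, h4, h5, h6, h7, h8, h9, h10, Ne.symm h1, Ne.symm h2, Ne.symm h3,
        Ne.symm h4, Ne.symm h5, Ne.symm h6, Ne.symm h7, Ne.symm h8, Ne.symm h9,
        Ne.symm h10, PySem.Dict.get?]

theorem pv_resolve_eq (seq : String) :
    (resolve_degenerate seq).toList = seq.toList.map find_primer_in_seq_trans := by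
  unfold resolve_degenerate
  simp [pv_char]

-- full mismatch count of the window of length |p| at offset i
def pvCnt (p t : List Char) (i : Nat) : Nat :=
  (p.zip ((t.drop i).take p.length)).countP (fun ab => ab.1 != ab.2)

theorem pv_mmCapped_eq (cap : Nat) (p : List Char) : ∀ (w : List Char) (mm : Nat), mm ≤ cap →
    find_primer_in_seq_mmCapped cap p w mm
      = min (mm + (p.zip w).countP (fun ab => ab.1 != ab.2)) (cap + 1) := by
  induction p with
  | nil => intro w mm h; cases w <;> simp [find_primer_in_seq_mmCapped] <;> omega
  | cons a as ih =>
      intro w mm h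
      cases w with
      | nil => simp [find_primer_in_seq_mmCapped]; omega
      | cons b bs =>
          rw [find_primer_in_seq_mmCapped]
          by_cases hab : a = b
          · simp [hab, ih bs mm h]
          · have hne : (a != b) = true := by simp [hab]
            rw [if_pos hne]
            by_cases hcap : mm + 1 > cap
            · have hmmc : mm = cap := by omega
              simp only [if_pos hcap]
              simp [List.countP_cons, hab, hmmc]
            · rw [if_neg hcap, ih bs (mm + 1) (by omega)]
              simp [List.countP_cons, hab]
              omega

theorem pv_zip_countP_zero (p : List Char) : ∀ (w : List Char), p.length = w.length →
    ((p.zip w).countP (fun ab => ab.1 != ab.2) = 0 ↔ p = w) := by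
  induction p with
  | nil => intro w h; cases w <;> simp_all
  | cons a as ih =>
      intro w h
      cases w with
      | nil => simp_all
      | cons b bs =>
          simp only [List.zip_cons_cons, List.countP_cons]
          by_cases hab : a = b
          · simp [hab, ih bs (by simpa using h)]
          · simp [hab]

theorem pv_cnt_zero_iff (p t : List Char) (i : Nat) (h : i + p.length ≤ t.length) :
    pvCnt p t i = 0 ↔ p <+: t.drop i := by
  have hlen : ((t.drop i).take p.length).length = p.length := by
    simp; omega
  rw [pvCnt, pv_zip_countP_zero p _ hlen.symm, List.prefix_iff_eq_take]

-- B's loop returns the first exact hit whatever first_approx holds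
theorem pv_loopB_exact (p t : List Char) (i0 : Nat) (hi0 : i0 ≤ t.length)
    (h0 : p <+: t.drop i0) (hmin : ∀ j, j < i0 → ¬ p <+: t.drop j) :
    ∀ k fa, k ≤ i0 → find_primer_in_seq_loopB p t k fa = some (i0 : Int) := by
  have hm : p.length ≤ t.length - i0 := by
    have := h0.length_le; simpa using this
  have main : ∀ d k fa, i0 - k = d → k ≤ i0 →
      find_primer_in_seq_loopB p t k fa = some (i0 : Int) := by
    intro d
    induction d with
    | zero =>
        intro k fa hd hk
        have hki : k = i0 := by omega
        subst hki
        rw [find_primer_in_seq_loopB]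
        have hc : k + p.length ≤ t.length := by omega
        rw [dif_pos hc]
        have hz : find_primer_in_seq_mmCapped 2 p ((t.drop k).take p.length) 0 = 0 := by
          rw [pv_mmCapped_eq 2 p _ 0 (by omega)]
          have : pvCnt p t k = 0 := (pv_cnt_zero_iff p t k hc).mpr h0
          rw [pvCnt] at this
          simp [this]
        simp [hz]
    | succ d ih =>
        intro k fa hd hk
        have hklt : k < i0 := by omega
        have hc : k + p.length ≤ t.length := by omega
        rw [find_primer_in_seq_loopB, dif_pos hc]
        have hnz : find_primer_in_seq_mmCapped 2 p ((t.drop k).take p.length) 0 ≠ 0 := by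
          rw [pv_mmCapped_eq 2 p _ 0 (by omega)]
          have hcnt : pvCnt p t k ≠ 0 := by
            intro hz
            exact hmin k hklt ((pv_cnt_zero_iff p t k hc).mp hz)
          rw [pvCnt] at hcnt
          omega
        rw [if_neg hnz]
        by_cases hbr : find_primer_in_seq_mmCapped 2 p ((t.drop k).take p.length) 0 ≤ 2
            ∧ fa = none
        · rw [if_pos hbr]; exact ih (k + 1) _ (by omega) (by omega)
        · rw [if_neg hbr]; exact ih (k + 1) _ (by omega) (by omega)
  intro k fa hk; exact main (i0 - k) k fa rfl hk

-- with no exact hit anywhere, a committed first_approx is final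
theorem pv_loopB_keep (p t : List Char) (hne : ∀ j, ¬ p <+: t.drop j) (x : Int) :
    ∀ k, find_primer_in_seq_loopB p t k (some x) = some x := by
  have main : ∀ d k, t.length + 1 - k = d →
      find_primer_in_seq_loopB p t k (some x) = some x := by
    intro d
    induction d with
    | zero =>
        intro k hd
        rw [find_primer_in_seq_loopB]
        have : ¬ (k + p.length ≤ t.length) := by omega
        rw [dif_neg this]
    | succ d ih =>
        intro k hd
        rw [find_primer_in_seq_loopB]
        by_cases hc : k + p.length ≤ t.length
        · rw [dif_pos hc]
          have hnz : find_primer_in_seq_mmCapped 2 p ((t.drop k).take p.length) 0 ≠ 0 := by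
            rw [pv_mmCapped_eq 2 p _ 0 (by omega)]
            have hcnt : pvCnt p t k ≠ 0 := by
              intro hz; exact hne k ((pv_cnt_zero_iff p t k hc).mp hz)
            rw [pvCnt] at hcnt
            omega
          rw [if_neg hnz]
          have hbr : ¬ (find_primer_in_seq_mmCapped 2 p ((t.drop k).take p.length) 0 ≤ 2
              ∧ (some x : Option Int) = none) := by simp
          rw [if_neg hbr]
          exact ih (k + 1) (by omega)
        · rw [dif_neg hc]
  intro k; exact main (t.length + 1 - k) k rfl

-- with no exact hit anywhere the two loops agree
theorem pv_loops_eq (p t : List Char) (hne : ∀ j, ¬ p <+: t.drop j) :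
    ∀ k : Nat,
      find_primer_in_seq_loopA p t (p.length : Int)
          (PySem.List.pyRange (k : Int) ((t.length : Int) - (p.length : Int) + 1) 1)
        = find_primer_in_seq_loopB p t k none := by
  have main : ∀ d k, t.length + 1 - k = d →
      find_primer_in_seq_loopA p t (p.length : Int)
          (PySem.List.pyRange (k : Int) ((t.length : Int) - (p.length : Int) + 1) 1)
        = find_primer_in_seq_loopB p t k none := by
    intro d
    induction d with
    | zero =>
        intro k hd
        have hnil : PySem.List.pyRange (k : Int) ((t.length : Int) - (p.length : Int) + 1) 1
            = [] := PySem.List.pyRange_one_eq_nil (by omega)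
        rw [hnil, find_primer_in_seq_loopB]
        have : ¬ (k + p.length ≤ t.length) := by omega
        rw [dif_neg this]
        rfl
    | succ d ih =>
        intro k hd
        by_cases hc : k + p.length ≤ t.length
        · have hlt : (k : Int) < (t.length : Int) - (p.length : Int) + 1 := by omega
          rw [PySem.List.pyRange_one_cons hlt]
          rw [find_primer_in_seq_loopA]
          have hslice : PySem.List.slice t (some (k : Int))
              (some ((k : Int) + (p.length : Int))) = (t.drop k).take p.length := by
            have := PySem.List.slice_natCast_add (xs := t) (j := k) (n := p.length)
            simpa using this
          rw [hslice]
          rw [find_primer_in_seq_loopB, dif_pos hc]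
          have hmm := pv_mmCapped_eq 2 p ((t.drop k).take p.length) 0 (by omega)
          have hcnt : pvCnt p t k ≠ 0 := by
            intro hz; exact hne k ((pv_cnt_zero_iff p t k hc).mp hz)
          rw [pvCnt] at hcnt
          by_cases hle : (p.zip ((t.drop k).take p.length)).countP (fun ab => ab.1 != ab.2) ≤ 2
          · have hA : (((p.zip ((t.drop k).take p.length)).countP
                (fun ab => ab.1 != ab.2) : Nat) : Int) ≤ 2 := by omega
            rw [if_pos hA]
            have hmmv : find_primer_in_seq_mmCapped 2 p ((t.drop k).take p.length) 0 ≠ 0 := by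
              rw [hmm]; omega
            rw [if_neg hmmv]
            have hbr : find_primer_in_seq_mmCapped 2 p ((t.drop k).take p.length) 0 ≤ 2
                ∧ (none : Option Int) = none := by
              constructor
              · rw [hmm]; omega
              · rfl
            rw [if_pos hbr, pv_loopB_keep p t hne]
          · have hA : ¬ ((((p.zip ((t.drop k).take p.length)).countP
                (fun ab => ab.1 != ab.2) : Nat) : Int) ≤ 2) := by
              push_neg; push_neg at hle; omega
            rw [if_neg hA]
            have hmmv : find_primer_in_seq_mmCapped 2 p ((t.drop k).take p.length) 0 ≠ 0 := by
              rw [hmm]; omega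
            rw [if_neg hmmv]
            have hbr : ¬ (find_primer_in_seq_mmCapped 2 p ((t.drop k).take p.length) 0 ≤ 2
                ∧ (none : Option Int) = none) := by
              rw [hmm]; push_neg at hle; simp; omega
            rw [if_neg hbr]
            have := ih (k + 1) (by omega)
            simpa [Nat.cast_add] using this
        · have hnil : PySem.List.pyRange (k : Int) ((t.length : Int) - (p.length : Int) + 1) 1
              = [] := PySem.List.pyRange_one_eq_nil (by omega)
          rw [hnil, find_primer_in_seq_loopB, dif_neg hc]
          rfl
  intro k; exact main (t.length + 1 - k) k rfl

-- ===== VERDICT (by name: the statement is the Claim_ definition above) =====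
theorem find_primer_in_seq_spec : Claim_equal_find_primer_in_seq := by
  intro primer target _
  unfold Spec_find_primer_in_seq find_primer_in_seq find_primer_in_seq_alt
  set pl : List Char := primer.toList.map find_primer_in_seq_trans with hpl
  have hres : (resolve_degenerate primer).toList = pl := pv_resolve_eq primer
  set t : List Char := target.toList with ht
  have hfind : PySem.Str.find target (resolve_degenerate primer)
      = PySem.Chars.find t pl := by
    rw [PySem.Str.find_eq, hres]
  by_cases hpos : PySem.Str.find target (resolve_degenerate primer) ≥ 0
  · rw [if_pos hpos]
    have hf0 : 0 ≤ PySem.Chars.find t pl := by rw [← hfind]; exact hpos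
    obtain ⟨hpre, hminlt⟩ := PySem.Chars.find_spec (s := t) (sub := pl) hf0
    have hle : (PySem.Chars.find t pl).toNat ≤ t.length := by
      have := PySem.Chars.find_le_length (s := t) (sub := pl)
      omega
    have := pv_loopB_exact pl t (PySem.Chars.find t pl).toNat hle hpre
      (fun j hj => hminlt j hj) 0 none (by omega)
    rw [this, hfind]
    congr 1
    omega
  · rw [if_neg hpos]
    have hneg : PySem.Chars.find t pl = -1 := by
      have hge := PySem.Chars.neg_one_le_find (s := t) (sub := pl)
      rw [← hfind] at hge ⊢
      omega
    have hninf : ¬ pl <:+: t := (PySem.Chars.find_eq_neg_one_iff (s := t) (sub := pl)).mp hneg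
    have hne : ∀ j, ¬ pl <+: t.drop j := by
      intro j hj
      have : PySem.Chars.isIn pl t = true :=
        (PySem.Chars.exists_prefix_drop_iff_isIn (s := t) (sub := pl)).mp ⟨j, hj⟩
      exact hninf ((PySem.Chars.isIn_iff_infix (s := t) (sub := pl)).mp this)
    have := pv_loops_eq pl t hne 0
    simp only [Nat.cast_zero] at this
    rw [← this]
    simp only [PySem.Str.len_eq, hres, ht]
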